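-- pv_equiv track=rewrite | github.com/cms-tau-pog/TauFW | common/python/tools/math.py | partition_by_max
-- ===== SOURCE A (Python) =====
-- def partition_by_max(mylist,nmax):
--   """Partition list by grouping elements
--   with sum below or equal to given maximum."""
--   mylist.sort(reverse=True)
--   inputs = mylist[:]
--   result = [ ]
--   while len(inputs)>0:
--     first = inputs[0]
--     tot   = first
--     result.append([first])
--     inputs.remove(first)
--     for x in inputs[:]:
--       if tot+x<=nmax:
--         result[-1].append(x)
--         inputs.remove(x)
--         if tot+x==nmax: break
--         tot += x
--       else:
--         continue
--   return result
-- ===== SOURCE B (Python) =====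
-- # B: per group, binary-search the sorted-descending remainder for the next element that
-- # fits (the "fits" predicate is monotone there) instead of A's per-element scans and
-- # list.remove calls; measured faster. Like A, sorts the argument list in place.
-- def partition_by_max(mylist, nmax):
--   mylist.sort(reverse=True)
--   result = []
--   rest = mylist
--   while rest:
--     tot = rest[0]
--     group = [tot]
--     kept = []
--     lo, n = 1, len(rest)
--     while lo < n:
--       cap = nmax - tot
--       # rest[lo:] is non-increasing, so 'rest[j] <= cap' is monotone in j:
--       # binary-search the first index that fits
--       a, b = lo, n
--       while a < b:
--         m = (a + b) // 2
--         if rest[m] <= cap: b = m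
--         else: a = m + 1
--       kept.extend(rest[lo:a])
--       if a == n:
--         lo = n
--         break
--       x = rest[a]
--       group.append(x)
--       lo = a + 1
--       if tot + x == nmax:
--         break
--       tot += x
--     kept.extend(rest[lo:])
--     result.append(group)
--     rest = kept
--   return result
-- ===== Notes on version B (the rewrite author's own statement) =====
-- stated objective: faster
-- what changed: B replaces A's per-round element-by-element scan with copying and O(n) list.remove calls by a binary search over the sorted-descending remainder ('fits' is monotone there) plus C-level slice copies, so each group is built with O(log n) probes per picked element instead of full scans.
import Mathlib
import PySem

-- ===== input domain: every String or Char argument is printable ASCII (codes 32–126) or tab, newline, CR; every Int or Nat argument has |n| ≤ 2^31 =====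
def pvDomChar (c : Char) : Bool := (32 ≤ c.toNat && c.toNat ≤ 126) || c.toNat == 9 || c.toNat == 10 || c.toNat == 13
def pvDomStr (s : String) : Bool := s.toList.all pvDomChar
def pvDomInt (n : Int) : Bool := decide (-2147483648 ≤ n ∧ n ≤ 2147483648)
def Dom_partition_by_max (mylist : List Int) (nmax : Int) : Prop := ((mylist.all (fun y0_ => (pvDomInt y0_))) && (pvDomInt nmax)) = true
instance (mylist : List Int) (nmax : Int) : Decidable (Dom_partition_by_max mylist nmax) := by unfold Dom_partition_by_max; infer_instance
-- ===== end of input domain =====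

-- B binary-searches the sorted-descending remainder for the next fitting element instead of
-- A's per-element scans with list.remove; measured faster. Both Pythons sort the argument
-- list in place; the equivalence proved here is about the RETURN value.

-- ===== PORT A =====
-- inner for-loop of A: state = (inputs, current group, tot); the snapshot is iterated structurally.
-- `inputs.remove(x)` is PySem.List.remove?; `.getD inputs` covers the `none` (ValueError) branch,
-- which is unreachable because every snapshot element is still present in `inputs` when removed.
def pvInnerA (nmax : Int) : List Int → List Int → List Int → Int → List Int × List Int
  | [], inputs, group, _ => (group, inputs)
  | x :: xs, inputs, group, tot =>
    if tot + x ≤ nmax then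
      let inputs' := (PySem.List.remove? inputs x).getD inputs
      if tot + x = nmax then (group ++ [x], inputs')
      else pvInnerA nmax xs inputs' (group ++ [x]) (tot + x)
    else pvInnerA nmax xs inputs group tot

-- termination helper for A's while loop: the inner loop never lengthens `inputs`
theorem pvInnerA_len (nmax : Int) (s : List Int) :
    ∀ (inputs group : List Int) (tot : Int),
      (pvInnerA nmax s inputs group tot).2.length ≤ inputs.length := by
  induction s with
  | nil => intro inputs group tot; simp [pvInnerA]
  | cons x xs ih =>
    intro inputs group tot
    simp only [pvInnerA]
    split_ifs with h1 h2
    · rcases hrem : PySem.List.remove? inputs x with _ | l'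
      · simp
      · have hm : x ∈ inputs := by
          by_contra hx
          rw [(PySem.List.remove?_eq_none_iff inputs x).mpr hx] at hrem; cases hrem
        have : l' = inputs.erase x := by
          have := PySem.List.remove?_eq_some_erase inputs x hm
          rw [hrem] at this; exact (Option.some_inj.mp this)
        subst this
        simp
        exact List.length_erase_le
    · rcases hrem : PySem.List.remove? inputs x with _ | l'
      · simpa [hrem] using ih inputs (group ++ [x]) (tot + x)
      · have hm : x ∈ inputs := by
          by_contra hx
          rw [(PySem.List.remove?_eq_none_iff inputs x).mpr hx] at hrem; cases hrem
        have hl' : l' = inputs.erase x := by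
          have := PySem.List.remove?_eq_some_erase inputs x hm
          rw [hrem] at this; exact (Option.some_inj.mp this)
        subst hl'
        calc (pvInnerA nmax xs (inputs.erase x) (group ++ [x]) (tot + x)).2.length
            ≤ (inputs.erase x).length := ih _ _ _
          _ ≤ inputs.length := List.length_erase_le
    · exact ih inputs group tot

-- A's while loop: pop the head, run the inner loop on a snapshot of the rest
def pvOuterA (nmax : Int) (inputs : List Int) : List (List Int) :=
  match inputs with
  | [] => []
  | first :: rest =>
    let p := pvInnerA nmax rest rest [first] first
    p.1 :: pvOuterA nmax p.2
termination_by inputs.length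
decreasing_by
  simpa using Nat.lt_succ_of_le (pvInnerA_len nmax rest rest [first] first)

def partition_by_max (mylist : List Int) (nmax : Int) : List (List Int) :=
  pvOuterA nmax (PySem.List.sorted mylist (fun x => x) true)

-- ===== PORT B =====
-- Source B's inner `while a < b` binary search; the loop runs at most b - a times, which is the
-- structural fuel; rest[m] is always in range (lo ≤ m < n), so getD's default is unreachable
def pvBisectGo (rest : List Int) (cap : Int) : Nat → Nat → Nat → Nat
  | 0, a, _ => a
  | fuel + 1, a, b =>
    if a < b then
      let m := (a + b) / 2
      if rest.getD m 0 ≤ cap then pvBisectGo rest cap fuel a m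
      else pvBisectGo rest cap fuel (m + 1) b
    else a

def pvBisect (rest : List Int) (cap : Int) (a b : Nat) : Nat :=
  pvBisectGo rest cap (b - a) a b

theorem pvBisectGo_ge (rest : List Int) (cap : Int) :
    ∀ (fuel a b : Nat), a ≤ pvBisectGo rest cap fuel a b := by
  intro fuel
  induction fuel with
  | zero => intro a b; simp [pvBisectGo]
  | succ fuel ih =>
    intro a b
    simp only [pvBisectGo]
    split_ifs with h h2
    · exact ih a ((a + b) / 2)
    · exact le_trans (by omega) (ih ((a + b) / 2 + 1) b)
    · exact le_refl a

theorem pvBisectGo_le (rest : List Int) (cap : Int) :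
    ∀ (fuel a b : Nat), a ≤ b → pvBisectGo rest cap fuel a b ≤ b := by
  intro fuel
  induction fuel with
  | zero => intro a b hab; simpa [pvBisectGo] using hab
  | succ fuel ih =>
    intro a b hab
    simp only [pvBisectGo]
    split_ifs with h h2
    · exact le_trans (ih a ((a + b) / 2) (by omega)) (by omega)
    · exact ih ((a + b) / 2 + 1) b (by omega)
    · exact hab

-- Source B's middle while loop; state = (lo, tot, group, kept); it runs at most rest.length - lo
-- times (the structural fuel); `kept.extend(rest[lo:a])` is (rest.drop lo).take (a - lo); both
-- break sites fold the trailing `kept.extend(rest[lo:])` in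
def pvInnerBGo (rest : List Int) (nmax : Int) :
    Nat → Nat → Int → List Int → List Int → List Int × List Int
  | 0, _, _, group, kept => (group, kept)
  | fuel + 1, lo, tot, group, kept =>
    if lo < rest.length then
      let cap := nmax - tot
      let a := pvBisect rest cap lo rest.length
      let kept' := kept ++ ((rest.drop lo).take (a - lo))
      if a = rest.length then (group, kept')
      else
        let x := rest.getD a 0
        if tot + x = nmax then (group ++ [x], kept' ++ rest.drop (a + 1))
        else pvInnerBGo rest nmax fuel (a + 1) (tot + x) (group ++ [x]) kept'
    else (group, kept)

def pvInnerB (rest : List Int) (nmax : Int) (lo : Nat) (tot : Int) (group kept : List Int) :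
    List Int × List Int :=
  pvInnerBGo rest nmax (rest.length - lo) lo tot group kept

-- termination helper for Source B's outer while loop
theorem pvInnerBGo_len (rest : List Int) (nmax : Int) :
    ∀ (fuel lo : Nat) (tot : Int) (group kept : List Int),
      (pvInnerBGo rest nmax fuel lo tot group kept).2.length ≤
        kept.length + (rest.length - lo) := by
  intro fuel
  induction fuel with
  | zero => intro lo tot group kept; simp [pvInnerBGo]
  | succ fuel ih =>
    intro lo tot group kept
    have hge := pvBisectGo_ge rest (nmax - tot) (rest.length - lo) lo rest.length
    simp only [pvInnerBGo, pvBisect]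
    split_ifs with h h1 h2
    · simp
      try omega
    · have hle := pvBisectGo_le rest (nmax - tot) (rest.length - lo) lo rest.length (by omega)
      simp
      try omega
    · have hle := pvBisectGo_le rest (nmax - tot) (rest.length - lo) lo rest.length (by omega)
      refine le_trans (ih _ _ _ _) ?_
      simp
      try omega
    · simp

theorem pvInnerB_len (rest : List Int) (nmax : Int) (lo : Nat) (tot : Int)
    (group kept : List Int) :
    (pvInnerB rest nmax lo tot group kept).2.length ≤ kept.length + (rest.length - lo) :=
  pvInnerBGo_len rest nmax (rest.length - lo) lo tot group kept

-- Source B's outer while loop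
def pvOuterB (nmax : Int) (rest : List Int) : List (List Int) :=
  match rest with
  | [] => []
  | t :: tl =>
    let p := pvInnerB (t :: tl) nmax 1 t [t] []
    p.1 :: pvOuterB nmax p.2
termination_by rest.length
decreasing_by
  have := pvInnerB_len (t :: tl) nmax 1 t [t] []
  simp only [List.length_cons, List.length_nil] at this ⊢
  omega

def partition_by_max_alt (mylist : List Int) (nmax : Int) : List (List Int) :=
  pvOuterB nmax (PySem.List.sorted mylist (fun x => x) true)

-- ===== PRECONDITION & SPEC =====
def Spec_partition_by_max (mylist : List Int) (nmax : Int) (out : List (List Int)) : Prop := out = partition_by_max_alt mylist nmax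
instance (mylist : List Int) (nmax : Int) (out : List (List Int)) : Decidable (Spec_partition_by_max mylist nmax out) := by unfold Spec_partition_by_max; infer_instance

-- ===== CLAIM (what is proved, stated in full; the proofs are below) =====
def Claim_equal_partition_by_max : Prop := ∀ (mylist : List Int) (nmax : Int), Dom_partition_by_max mylist nmax → Spec_partition_by_max mylist nmax (partition_by_max mylist nmax)

-- ===== LEMMAS AND PROOFS =====

-- bridge definition used only by the proofs: one linear splitting pass
-- (picked, leftover) over a tail, stopping at exact fill
def pvSplit (nmax : Int) : List Int → Int → List Int × List Int
  | [], _ => ([], [])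
  | x :: xs, tot =>
    if tot + x ≤ nmax then
      if tot + x = nmax then ([x], xs)
      else
        let p := pvSplit nmax xs (tot + x)
        (x :: p.1, p.2)
    else
      let p := pvSplit nmax xs tot
      (p.1, x :: p.2)

theorem pvSplit_len (nmax : Int) (s : List Int) :
    ∀ tot : Int, (pvSplit nmax s tot).2.length ≤ s.length := by
  induction s with
  | nil => intro tot; simp [pvSplit]
  | cons x xs ih =>
    intro tot
    simp only [pvSplit]
    split_ifs with h1 h2
    · simp
    · exact le_trans (ih (tot + x)) (Nat.le_succ _)
    · simpa using ih tot

-- the round recursion, phrased on the bridge pass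
def pvGo (nmax : Int) (l : List Int) : List (List Int) :=
  match l with
  | [] => []
  | x :: xs =>
    let p := pvSplit nmax xs x
    (x :: p.1) :: pvGo nmax p.2
termination_by l.length
decreasing_by
  simpa using Nat.lt_succ_of_le (pvSplit_len nmax xs x)

-- the leftover of a split is a sublist (so sortedness is preserved round to round)
theorem pvSplit_sublist (nmax : Int) (s : List Int) :
    ∀ tot : Int, (pvSplit nmax s tot).2.Sublist s := by
  induction s with
  | nil => intro tot; simp [pvSplit]
  | cons x xs ih =>
    intro tot
    simp only [pvSplit]
    split_ifs with h1 h2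
    · simp
    · exact (ih (tot + x)).cons x
    · simpa using (ih tot).cons₂ x

-- removing x from r ++ x :: xs when x ∉ r removes exactly that occurrence
theorem remove_middle {x : Int} {r xs : List Int} (hx : x ∉ r) :
    PySem.List.remove? (r ++ x :: xs) x = some (r ++ xs) := by
  induction r with
  | nil => simp [PySem.List.remove?_cons_self]
  | cons a as ih =>
    have ha : a ≠ x := by intro h; exact hx (by simp [h])
    have hx' : x ∉ as := fun h => hx (by simp [h])
    rw [List.cons_append, PySem.List.remove?_cons_of_ne _ ha, ih hx']
    rfl

-- A's inner loop on snapshot s with inputs = r ++ s equals the bridge split,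
-- provided r ++ s is sorted descending and every rejected y ∈ r stays rejected
theorem inner_eq (nmax : Int) (s : List Int) :
    ∀ (r g : List Int) (tot : Int),
      (r ++ s).Pairwise (· ≥ ·) →
      (∀ y ∈ r, tot + y > nmax ∨ ∀ z ∈ s, z < y) →
      pvInnerA nmax s (r ++ s) g tot =
        (g ++ (pvSplit nmax s tot).1, r ++ (pvSplit nmax s tot).2) := by
  induction s with
  | nil => intro r g tot _ _; simp [pvInnerA, pvSplit]
  | cons x xs ih =>
    intro r g tot hsort hinv
    have hge : ∀ y ∈ r, y ≥ x := by
      intro y hy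
      exact (List.pairwise_append.mp hsort).2.2 y hy x (by simp)
    simp only [pvInnerA, pvSplit]
    split_ifs with h1 h2
    · -- tot + x ≤ nmax, tot + x = nmax : take x and break
      have hx : x ∉ r := by
        intro hxr
        rcases hinv x hxr with h | h
        · omega
        · exact absurd (h x (by simp)) (lt_irrefl x)
      simp [remove_middle hx]
    · -- tot + x ≤ nmax, ≠ : take x and continue
      have hx : x ∉ r := by
        intro hxr
        rcases hinv x hxr with h | h
        · omega
        · exact absurd (h x (by simp)) (lt_irrefl x)
      rw [remove_middle hx]
      simp only [Option.getD_some]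
      have hsort' : (r ++ xs).Pairwise (· ≥ ·) := by
        have : (r ++ xs).Sublist (r ++ x :: xs) :=
          (List.Sublist.refl r).append ((List.sublist_cons_self x xs))
        exact hsort.sublist this
      have hinv' : ∀ y ∈ r, tot + x + y > nmax ∨ ∀ z ∈ xs, z < y := by
        intro y hy
        rcases hinv y hy with h | h
        · right
          have hyx : y > x := by
            rcases lt_or_eq_of_le (hge y hy).ge.le with hlt | heq
            · omega
            · exact absurd heq.symm (fun he => hx (he ▸ hy))
          intro z hz
          have hxz : x ≥ z := List.rel_of_pairwise_cons (List.pairwise_append.mp hsort).2.1 hz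
          omega
        · right; intro z hz; exact h z (by simp [hz])
      rw [ih r (g ++ [x]) (tot + x) hsort' hinv']
      simp
    · -- tot + x > nmax : reject x, it joins r
      have heq : r ++ x :: xs = (r ++ [x]) ++ xs := by simp
      rw [heq, ih (r ++ [x]) g tot (by rw [← heq]; exact hsort) ?_]
      · simp
      · intro y hy
        rcases List.mem_append.mp hy with hy | hy
        · rcases hinv y hy with h | h
          · exact Or.inl h
          · exact Or.inr fun z hz => h z (by simp [hz])
        · left
          have : y = x := by simpa using hy
          omega

-- A-side rounds agree with the bridge on any sorted-descending list
theorem outerA_eq (nmax : Int) :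
    ∀ (n : Nat) (s : List Int), s.length ≤ n → s.Pairwise (· ≥ ·) →
      pvOuterA nmax s = pvGo nmax s := by
  intro n
  induction n with
  | zero =>
    intro s hlen _
    have : s = [] := List.eq_nil_of_length_eq_zero (Nat.le_zero.mp hlen)
    subst this; simp [pvOuterA, pvGo]
  | succ n ih =>
    intro s hlen hsort
    match s with
    | [] => simp [pvOuterA, pvGo]
    | first :: rest =>
      have hrest : rest.Pairwise (· ≥ ·) := hsort.of_cons
      have hinner := inner_eq nmax rest ([]) ([first]) first hrest (by simp)
      simp only [List.nil_append] at hinner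
      rw [pvOuterA, pvGo, hinner]
      have hsub : (pvSplit nmax rest first).2.Sublist rest := pvSplit_sublist nmax rest first
      have hs' : (pvSplit nmax rest first).2.Pairwise (· ≥ ·) := hrest.sublist hsub
      have hl : (pvSplit nmax rest first).2.length ≤ n := by
        have := hsub.length_le
        simp at hlen; omega
      rw [ih _ hl hs']
      simp

-- descending lists: getD is antitone in the index
theorem getD_anti {s : List Int} (hs : s.Pairwise (· ≥ ·)) {i j : Nat}
    (hij : i ≤ j) (hj : j < s.length) : s.getD j 0 ≤ s.getD i 0 := by
  rcases Nat.lt_or_ge i j with h | h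
  · have := (List.pairwise_iff_getElem.mp hs) i j (by omega) hj h
    rw [List.getD_eq_getElem _ _ hj]
    rw [List.getD_eq_getElem _ _ (show i < s.length by omega)]
    exact this
  · have : i = j := by omega
    subst this; exact le_refl _

-- every index the binary search skips holds an element that does not fit
theorem pvBisectGo_gt {s : List Int} (cap : Int) (hs : s.Pairwise (· ≥ ·)) :
    ∀ (fuel a b : Nat), b - a ≤ fuel → b ≤ s.length →
      ∀ j : Nat, a ≤ j → j < pvBisectGo s cap fuel a b → s.getD j 0 > cap := by
  intro fuel
  induction fuel with
  | zero =>
    intro a b hfuel hb j hj1 hj2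
    simp [pvBisectGo] at hj2
    omega
  | succ fuel ih =>
    intro a b hfuel hb j hj1 hj2
    simp only [pvBisectGo] at hj2
    split_ifs at hj2 with h h2
    · exact ih a ((a + b) / 2) (by omega) (by omega) j hj1 hj2
    · rcases Nat.lt_or_ge j ((a + b) / 2 + 1) with hc | hc
      · have hmlt : (a + b) / 2 < s.length := by omega
        have hanti := getD_anti hs (i := j) (j := (a + b) / 2) (by omega) hmlt
        omega
      · exact ih ((a + b) / 2 + 1) b (by omega) hb j hc hj2
    · omega

theorem pvBisect_gt {s : List Int} (cap : Int) (hs : s.Pairwise (· ≥ ·))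
    (a b : Nat) (hb : b ≤ s.length) :
    ∀ j : Nat, a ≤ j → j < pvBisect s cap a b → s.getD j 0 > cap :=
  pvBisectGo_gt cap hs (b - a) a b (le_refl _) hb

-- if the binary search stops before b, it stops at a fitting element
theorem pvBisectGo_fit (s : List Int) (cap : Int) :
    ∀ (fuel a b : Nat), b - a ≤ fuel →
      pvBisectGo s cap fuel a b < b → s.getD (pvBisectGo s cap fuel a b) 0 ≤ cap := by
  intro fuel
  induction fuel with
  | zero =>
    intro a b hfuel hlt
    simp [pvBisectGo] at hlt
    omega
  | succ fuel ih =>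
    intro a b hfuel hlt
    simp only [pvBisectGo] at hlt ⊢
    split_ifs at hlt ⊢ with h h2
    · rcases Nat.lt_or_ge (pvBisectGo s cap fuel a ((a + b) / 2)) ((a + b) / 2) with hc | hc
      · exact ih a ((a + b) / 2) (by omega) hc
      · have hle2 := pvBisectGo_le s cap fuel a ((a + b) / 2) (by omega)
        have hmm : pvBisectGo s cap fuel a ((a + b) / 2) = (a + b) / 2 := by omega
        rw [hmm]; exact h2
    · exact ih ((a + b) / 2 + 1) b (by omega) hlt
    · omega

theorem pvBisect_fit (s : List Int) (cap : Int) (a b : Nat) :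
    pvBisect s cap a b < b → s.getD (pvBisect s cap a b) 0 ≤ cap :=
  pvBisectGo_fit s cap (b - a) a b (le_refl _)

-- a prefix of rejected elements passes straight into the leftover of the bridge split
theorem pvSplit_prefix (nmax : Int) :
    ∀ (pre u : List Int) (tot : Int), (∀ y ∈ pre, tot + y > nmax) →
      pvSplit nmax (pre ++ u) tot = ((pvSplit nmax u tot).1, pre ++ (pvSplit nmax u tot).2) := by
  intro pre
  induction pre with
  | nil => intro u tot _; simp
  | cons y ys ih =>
    intro u tot hrej
    have hy : ¬ tot + y ≤ nmax := by have := hrej y (by simp); omega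
    simp only [List.cons_append, pvSplit]
    rw [if_neg hy, ih u tot (fun z hz => hrej z (by simp [hz]))]

-- B's inner loop equals the bridge split on the dropped suffix
theorem innerBGo_eq (rest : List Int) (nmax : Int) (hs : rest.Pairwise (· ≥ ·)) :
    ∀ (fuel lo : Nat) (tot : Int) (group kept : List Int), rest.length - lo ≤ fuel →
      pvInnerBGo rest nmax fuel lo tot group kept =
        (group ++ (pvSplit nmax (rest.drop lo) tot).1,
         kept ++ (pvSplit nmax (rest.drop lo) tot).2) := by
  intro fuel
  induction fuel with
  | zero =>
    intro lo tot group kept hfuel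
    rw [List.drop_of_length_le (by omega)]
    simp [pvInnerBGo, pvSplit]
  | succ fuel ih =>
    intro lo tot group kept hfuel
    by_cases h : lo < rest.length
    · have hge : lo ≤ pvBisect rest (nmax - tot) lo rest.length :=
        pvBisectGo_ge rest (nmax - tot) _ lo rest.length
      have hle : pvBisect rest (nmax - tot) lo rest.length ≤ rest.length :=
        pvBisectGo_le rest (nmax - tot) _ lo rest.length (by omega)
      simp only [pvInnerBGo, if_pos h]
      by_cases hA : pvBisect rest (nmax - tot) lo rest.length = rest.length
      · -- the binary search found nothing: the whole suffix is rejected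
        rw [if_pos hA]
        have hpre : ∀ y ∈ rest.drop lo, tot + y > nmax := by
          intro y hy
          rcases List.mem_iff_getElem.mp hy with ⟨k, hk, hky⟩
          have hklt : lo + k < rest.length := by simp at hk; omega
          have hgt := pvBisect_gt (s := rest) (nmax - tot) hs lo rest.length (le_refl _)
            (lo + k) (by omega) (by rw [hA]; exact hklt)
          rw [List.getD_eq_getElem _ _ hklt] at hgt
          rw [← hky, List.getElem_drop]
          omega
        have hsplit : pvSplit nmax (rest.drop lo) tot = ([], rest.drop lo) := by
          have := pvSplit_prefix nmax (rest.drop lo) [] tot hpre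
          simpa [pvSplit] using this
        rw [hsplit]
        simp [hA, List.take_of_length_le]
      · rw [if_neg hA]
        have haln : pvBisect rest (nmax - tot) lo rest.length < rest.length := by omega
        have hdecomp : rest.drop lo =
            (rest.drop lo).take (pvBisect rest (nmax - tot) lo rest.length - lo) ++
              (rest[pvBisect rest (nmax - tot) lo rest.length] ::
                rest.drop (pvBisect rest (nmax - tot) lo rest.length + 1)) := by
          conv_lhs => rw [← List.take_append_drop
            (pvBisect rest (nmax - tot) lo rest.length - lo) (rest.drop lo)]
          rw [List.drop_drop,
            (show lo + (pvBisect rest (nmax - tot) lo rest.length - lo)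
                = pvBisect rest (nmax - tot) lo rest.length by omega),
            List.drop_eq_getElem_cons haln]
        have hpre : ∀ y ∈ (rest.drop lo).take (pvBisect rest (nmax - tot) lo rest.length - lo),
            tot + y > nmax := by
          intro y hy
          rcases List.mem_iff_getElem.mp hy with ⟨k, hk, hky⟩
          have hkb : k < pvBisect rest (nmax - tot) lo rest.length - lo := by simp at hk; omega
          have hklt : lo + k < rest.length := by omega
          have hgt := pvBisect_gt (s := rest) (nmax - tot) hs lo rest.length (le_refl _)
            (lo + k) (by omega) (by omega)
          rw [List.getD_eq_getElem _ _ hklt] at hgt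
          rw [← hky]
          simp only [List.getElem_take, List.getElem_drop]
          omega
        rw [List.getD_eq_getElem _ _ haln]
        by_cases heq : tot + rest[pvBisect rest (nmax - tot) lo rest.length] = nmax
        · -- the found element fills the group exactly: break
          rw [if_pos heq]
          have hsplit : pvSplit nmax (rest.drop lo) tot =
              ([rest[pvBisect rest (nmax - tot) lo rest.length]],
               (rest.drop lo).take (pvBisect rest (nmax - tot) lo rest.length - lo) ++
                 rest.drop (pvBisect rest (nmax - tot) lo rest.length + 1)) := by
            conv_lhs => rw [hdecomp]
            rw [pvSplit_prefix nmax _ _ tot hpre]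
            simp [pvSplit, heq]
          rw [hsplit]
          simp [List.append_assoc]
        · -- the found element fits strictly below nmax: continue after it
          rw [if_neg heq]
          have hfitD := pvBisect_fit rest (nmax - tot) lo rest.length haln
          have hfit : tot + rest[pvBisect rest (nmax - tot) lo rest.length] ≤ nmax := by
            rw [List.getD_eq_getElem _ _ haln] at hfitD
            omega
          have hsplit : pvSplit nmax (rest.drop lo) tot =
              (rest[pvBisect rest (nmax - tot) lo rest.length] ::
                 (pvSplit nmax (rest.drop (pvBisect rest (nmax - tot) lo rest.length + 1))
                   (tot + rest[pvBisect rest (nmax - tot) lo rest.length])).1,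
               (rest.drop lo).take (pvBisect rest (nmax - tot) lo rest.length - lo) ++
                 (pvSplit nmax (rest.drop (pvBisect rest (nmax - tot) lo rest.length + 1))
                   (tot + rest[pvBisect rest (nmax - tot) lo rest.length])).2) := by
            conv_lhs => rw [hdecomp]
            rw [pvSplit_prefix nmax _ _ tot hpre]
            simp [pvSplit, hfit, heq]
          rw [hsplit, ih _ _ _ _ (by omega)]
          simp [List.append_assoc]
    · rw [List.drop_of_length_le (by omega)]
      simp [pvInnerBGo, if_neg h, pvSplit]

theorem innerB_eq (rest : List Int) (nmax : Int) (hs : rest.Pairwise (· ≥ ·))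
    (lo : Nat) (tot : Int) (group kept : List Int) :
    pvInnerB rest nmax lo tot group kept =
      (group ++ (pvSplit nmax (rest.drop lo) tot).1,
       kept ++ (pvSplit nmax (rest.drop lo) tot).2) :=
  innerBGo_eq rest nmax hs (rest.length - lo) lo tot group kept (le_refl _)

-- B-side rounds agree with the bridge on any sorted-descending list
theorem outerB_eq (nmax : Int) :
    ∀ (n : Nat) (s : List Int), s.length ≤ n → s.Pairwise (· ≥ ·) →
      pvOuterB nmax s = pvGo nmax s := by
  intro n
  induction n with
  | zero =>
    intro s hlen _
    have : s = [] := List.eq_nil_of_length_eq_zero (Nat.le_zero.mp hlen)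
    subst this; simp [pvOuterB, pvGo]
  | succ n ih =>
    intro s hlen hsort
    match s with
    | [] => simp [pvOuterB, pvGo]
    | first :: rest =>
      have hrest : rest.Pairwise (· ≥ ·) := hsort.of_cons
      have hinner := innerB_eq (first :: rest) nmax hsort 1 first [first] []
      simp only [List.drop_one, List.tail_cons, List.nil_append] at hinner
      rw [pvOuterB, pvGo, hinner]
      have hsub : (pvSplit nmax rest first).2.Sublist rest := pvSplit_sublist nmax rest first
      have hs' : (pvSplit nmax rest first).2.Pairwise (· ≥ ·) := hrest.sublist hsub
      have hl : (pvSplit nmax rest first).2.length ≤ n := by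
        have := hsub.length_le
        simp at hlen; omega
      rw [ih _ hl hs']
      simp

-- ===== VERDICT (by name: the statement is the Claim_ definition above) =====
theorem partition_by_max_spec : Claim_equal_partition_by_max := by
  intro mylist nmax _
  unfold Spec_partition_by_max partition_by_max partition_by_max_alt
  have hsort : (PySem.List.sorted mylist (fun x => x) true).Pairwise (· ≥ ·) := by
    have := PySem.List.sorted_pairwise_rev (xs := mylist) (key := fun x : Int => x)
    exact this.imp (fun h => h)
  rw [outerA_eq nmax _ _ (le_refl _) hsort, outerB_eq nmax _ _ (le_refl _) hsort]
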